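-- pv_equiv track=rewrite | github.com/Rokawoo/vrchai | stringProcessing.py | end_sentence
-- ===== SOURCE A (Python) =====
-- def end_sentence(input_string):
--     """
--     Ensure that the given input string ends with an appropriate face or expression.
--
--     Parameters:
--     - input_string (str): The input string to be modified.
--
--     Returns:
--     - str: The modified input string.
--     """
--     punctuation_set = {'<', '>', '^', '~', '.', '?', '!'}
--
--     faces_to_keep = {'Awoof~!', '>w<', '^w^', '^^', '>.<', '>//w//<', '>.>'}
--
--     last_punctuation_index = max(input_string.rfind(p) for p in punctuation_set)
--
--     if last_punctuation_index >= 0: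
--         # Delete everything after the last punctuation
--         input_string = input_string[:last_punctuation_index + 1]
--
--         if any(input_string.endswith(face) for face in faces_to_keep):
--             return input_string
--
--     # If none of the faces are found or there's no punctuation, just append the word to the resulting string
--     return input_string + " Awoof~! ^^"
-- ===== SOURCE B (Python) =====
-- def end_sentence(input_string):
--     """
--     Ensure that the given input string ends with an appropriate face or expression.
--     Single backward scan instead of seven separate rfind passes.
--     """
--     punctuation = "<>^~.?!"
--     faces_to_keep = ('Awoof~!', '>w<', '^w^', '^^', '>.<', '>//w//<', '>.>')
--
--     idx = -1
--     for i in range(len(input_string) - 1, -1, -1):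
--         if input_string[i] in punctuation:
--             idx = i
--             break
--
--     if idx >= 0:
--         trimmed = input_string[:idx + 1]
--         if trimmed.endswith(faces_to_keep):
--             return trimmed
--         return trimmed + " Awoof~! ^^"
--     return input_string + " Awoof~! ^^"
-- ===== Notes on version B (the rewrite author's own statement) =====
-- stated objective: alternative
-- what changed: Replaces seven separate rfind scans plus a max over them with a single short-circuiting backward scan that stops at the last punctuation character.
import Mathlib
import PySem

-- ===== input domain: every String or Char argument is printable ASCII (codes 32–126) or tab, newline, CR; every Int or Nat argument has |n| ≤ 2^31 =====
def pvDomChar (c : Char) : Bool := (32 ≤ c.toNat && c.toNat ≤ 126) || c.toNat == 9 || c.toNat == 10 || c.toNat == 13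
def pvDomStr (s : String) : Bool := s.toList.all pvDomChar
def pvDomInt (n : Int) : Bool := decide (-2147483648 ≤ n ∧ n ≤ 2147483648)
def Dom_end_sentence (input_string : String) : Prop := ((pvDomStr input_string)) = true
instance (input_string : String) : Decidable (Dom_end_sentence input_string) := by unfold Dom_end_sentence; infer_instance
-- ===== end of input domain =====

-- B replaces seven rfind scans + max with one short-circuiting backward scan (objective: alternative decomposition).


-- ===== PORT A =====
-- " Awoof~! ^^" as a char list (strings are handled as char lists throughout)
def awoofSuffix : List Char := [' ', 'A', 'w', 'o', 'o', 'f', '~', '!', ' ', '^', '^']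

-- the seven faces of faces_to_keep (any() over a set: iteration order is irrelevant to the boolean)
def facesToKeep : List (List Char) :=
  [['A','w','o','o','f','~','!'], ['>','w','<'], ['^','w','^'], ['^','^'],
   ['>','.','<'], ['>','/','/','w','/','/','<'], ['>','.','>']]

def end_sentence (input_string : String) : String :=
  let s := input_string.toList
  let punctuation_set : List Char := ['<', '>', '^', '~', '.', '?', '!']
  -- max(input_string.rfind(p) for p in punctuation_set); the generator is nonempty so max? is some
  let last_punctuation_index : Int :=
    match PySem.List.max? (punctuation_set.map (fun p => PySem.Chars.rfind s [p])) (fun x => x) with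
    | some m => m
    | none => -1   -- unreachable: punctuation_set is nonempty
  if 0 ≤ last_punctuation_index then
    let trimmed := PySem.Chars.slice s none (some (last_punctuation_index + 1))
    if facesToKeep.any (fun face => PySem.Chars.endswith trimmed face) then
      String.ofList trimmed
    else
      String.ofList (trimmed ++ awoofSuffix)
  else
    String.ofList (s ++ awoofSuffix)

-- ===== PORT B =====
-- c in "<>^~.?!"
def bPunct (c : Char) : Bool :=
  c == '<' || c == '>' || c == '^' || c == '~' || c == '.' || c == '?' || c == '!'

-- for i in range(len(s)-1, -1, -1): if s[i] in punctuation: idx = i; break   (else idx stays -1)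
-- s.getD j ' ' : the index j is always in range when called, so the default is never consulted
def bScan (s : List Char) : Nat → Int
  | 0 => -1
  | j + 1 => if bPunct (s.getD j ' ') then (j : Int) else bScan s j

def end_sentence_alt (input_string : String) : String :=
  let s := input_string.toList
  let idx := bScan s s.length
  if 0 ≤ idx then
    let trimmed := s.take (idx.toNat + 1)
    if facesToKeep.any (fun face => face.isSuffixOf trimmed) then
      String.ofList trimmed
    else
      String.ofList (trimmed ++ awoofSuffix)
  else
    String.ofList (s ++ awoofSuffix)

-- ===== PRECONDITION & SPEC =====
def Spec_end_sentence (input_string : String) (out : String) : Prop := out = end_sentence_alt input_string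
instance (input_string : String) (out : String) : Decidable (Spec_end_sentence input_string out) := by unfold Spec_end_sentence; infer_instance

-- ===== CLAIM (what is proved, stated in full; the proofs are below) =====
def Claim_equal_end_sentence : Prop := ∀ (input_string : String), Dom_end_sentence input_string → Spec_end_sentence input_string (end_sentence input_string)


-- ===== LEMMAS AND PROOFS =====

theorem go_step (s sub : List Char) (j : Nat) :
    PySem.Chars.rfind.go s sub (j + 1)
      = if sub.isPrefixOf (s.drop (j + 1)) then ((j : Int) + 1) else PySem.Chars.rfind.go s sub j := by
  simp [PySem.Chars.rfind.go]

theorem go_zero (s sub : List Char) :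
    PySem.Chars.rfind.go s sub 0 = if sub.isPrefixOf s then 0 else -1 := by
  simp [PySem.Chars.rfind.go]

theorem neg_one_le_go (s : List Char) (c : Char) (i : Nat) :
    -1 ≤ PySem.Chars.rfind.go s [c] i := by
  induction i with
  | zero => rw [go_zero]; split <;> omega
  | succ j ih => rw [go_step]; split <;> omega

theorem go_le (s : List Char) (c : Char) (i : Nat) :
    PySem.Chars.rfind.go s [c] i ≤ (i : Int) := by
  induction i with
  | zero => rw [go_zero]; split <;> omega
  | succ j ih => rw [go_step]; split
                 · omega
                 · exact le_trans ih (by omega)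

theorem singleton_isPrefixOf_drop (s : List Char) (c : Char) (j : Nat) :
    [c].isPrefixOf (s.drop j) = true ↔ s[j]? = some c := by
  rw [List.isPrefixOf_iff_prefix]
  constructor
  · rintro ⟨t, ht⟩
    have h : (s.drop j).head? = some c := by rw [← ht]; rfl
    rwa [List.head?_drop] at h
  · intro h
    have hh : (s.drop j).head? = some c := by rwa [List.head?_drop]
    cases hd : s.drop j with
    | nil => simp [hd] at hh
    | cons a t => simp [hd] at hh; exact ⟨t, by simp [hh]⟩

theorem foldl_max_le (l : List Int) (a j : Int) (ha : a ≤ j) (hl : ∀ x ∈ l, x ≤ j) :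
    l.foldl max a ≤ j := by
  induction l generalizing a with
  | nil => exact ha
  | cons x t ih =>
    simp only [List.foldl_cons]
    exact ih (max a x) (max_le ha (hl x (by simp))) (fun y hy => hl y (by simp [hy]))

theorem le_foldl_max_init (l : List Int) (a : Int) : a ≤ l.foldl max a := by
  induction l generalizing a with
  | nil => simp
  | cons x t ih => exact le_trans (le_max_left a x) (ih (max a x))

theorem le_foldl_max_of_mem (l : List Int) (a x : Int) (hx : x ∈ l) :
    x ≤ l.foldl max a := by
  induction l generalizing a with
  | nil => simp at hx
  | cons y t ih =>
    simp only [List.foldl_cons]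
    rcases List.mem_cons.mp hx with h | h
    · subst h; exact le_trans (le_max_right a x) (le_foldl_max_init t (max a x))
    · exact ih _ h

def pList : List Char := ['<', '>', '^', '~', '.', '?', '!']

def maxGo (s : List Char) (i : Nat) : Int :=
  (pList.map (fun p => PySem.Chars.rfind.go s [p] i)).foldl max (-1)

theorem bPunct_iff (c : Char) : bPunct c = true ↔ c ∈ pList := by
  simp only [bPunct, pList, Bool.or_eq_true, beq_iff_eq, List.mem_cons, List.not_mem_nil, or_false]
  tauto

theorem maxGo_eq_bScan (s : List Char) (j : Nat) (hj : j < s.length) :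
    maxGo s j = bScan s (j + 1) := by
  induction j with
  | zero =>
    have hc : s[0]? = some s[0] := List.getElem?_eq_getElem hj
    have hgd : s.getD 0 ' ' = s[0] := List.getD_eq_getElem s ' ' hj
    show maxGo s 0 = if bPunct (s.getD 0 ' ') then (0:Int) else bScan s 0
    rw [hgd]
    by_cases hb : bPunct s[0] = true
    · rw [if_pos hb]
      refine le_antisymm ?_ ?_
      · refine foldl_max_le _ _ _ (by omega) ?_
        intro x hx
        rcases List.mem_map.mp hx with ⟨p, _, hp⟩
        rw [← hp, go_zero]
        split <;> omega
      · refine le_foldl_max_of_mem _ _ _ ?_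
        refine List.mem_map.mpr ⟨s[0], (bPunct_iff _).mp hb, ?_⟩
        have hp : [s[0]].isPrefixOf s = true := by
          have h2 := (singleton_isPrefixOf_drop s s[0] 0).mpr hc
          simpa using h2
        rw [go_zero, if_pos hp]
    · rw [if_neg hb]
      show (pList.map fun p => PySem.Chars.rfind.go s [p] 0).foldl max (-1) = -1
      refine le_antisymm ?_ (le_foldl_max_init _ _)
      refine foldl_max_le _ _ _ (by omega) ?_
      intro x hx
      rcases List.mem_map.mp hx with ⟨p, hpm, hp⟩
      rw [← hp, go_zero]
      split
      · next hpre =>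
        exfalso
        have := (singleton_isPrefixOf_drop s p 0).mp (by simpa using hpre)
        rw [hc] at this
        exact hb (by rw [Option.some.inj this]; exact (bPunct_iff p).mpr hpm)
      · omega
  | succ j ih =>
    have hj' : j < s.length := by omega
    have hc : s[j+1]? = some s[j+1] := List.getElem?_eq_getElem hj
    have hgd : s.getD (j+1) ' ' = s[j+1] := List.getD_eq_getElem s ' ' hj
    show maxGo s (j+1) = if bPunct (s.getD (j+1) ' ') then ((j:Int)+1) else bScan s (j+1)
    rw [hgd]
    by_cases hb : bPunct s[j+1] = true
    · rw [if_pos hb]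
      refine le_antisymm ?_ ?_
      · refine foldl_max_le _ _ _ (by omega) ?_
        intro x hx
        rcases List.mem_map.mp hx with ⟨p, _, hp⟩
        rw [← hp, go_step]
        split
        · omega
        · exact le_trans (go_le s p j) (by omega)
      · refine le_foldl_max_of_mem _ _ _ ?_
        refine List.mem_map.mpr ⟨s[j+1], (bPunct_iff _).mp hb, ?_⟩
        rw [go_step, if_pos ((singleton_isPrefixOf_drop s s[j+1] (j+1)).mpr hc)]
    · rw [if_neg hb, ← ih hj']
      show (pList.map fun p => PySem.Chars.rfind.go s [p] (j+1)).foldl max (-1) = maxGo s j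
      unfold maxGo
      congr 1
      refine List.map_congr_left ?_
      intro p hpm
      rw [go_step, if_neg]
      intro hpre
      have := (singleton_isPrefixOf_drop s p (j+1)).mp hpre
      rw [hc] at this
      exact hb (by rw [Option.some.inj this]; exact (bPunct_iff p).mpr hpm)

theorem maxGo_len (s : List Char) : maxGo s s.length = bScan s s.length := by
  cases hl : s.length with
  | zero =>
    show (pList.map fun p => PySem.Chars.rfind.go s [p] 0).foldl max (-1) = -1
    have hs : s = [] := List.length_eq_zero_iff.mp hl
    subst hs
    decide
  | succ m =>
    have h1 : maxGo s (m+1) = maxGo s m := by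
      unfold maxGo
      congr 1
      refine List.map_congr_left ?_
      intro p _
      rw [go_step, if_neg]
      simp [show s.drop (m+1) = [] from List.drop_eq_nil_of_le (by omega)]
    rw [h1, maxGo_eq_bScan s m (by omega)]

theorem idx_eq (s : List Char) :
    (pList.map (fun p => PySem.Chars.rfind s [p])).foldl max (-1) = bScan s s.length := by
  have : (pList.map fun p => PySem.Chars.rfind s [p])
       = (pList.map fun p => PySem.Chars.rfind.go s [p] s.length) := rfl
  rw [this]
  exact maxGo_len s

theorem endswith_eq_isSuffixOf (t f : List Char) :
    PySem.Chars.endswith t f = f.isSuffixOf t := by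
  rw [Bool.eq_iff_iff, PySem.Chars.endswith_iff, List.isSuffixOf_iff_suffix]

-- ===== VERDICT (by name: the statement is the Claim_ definition above) =====
theorem end_sentence_spec : Claim_equal_end_sentence := by
  intro inp _
  show end_sentence inp = end_sentence_alt inp
  unfold end_sentence end_sentence_alt
  have hmax : PySem.List.max?
      ((['<','>','^','~','.','?','!'] : List Char).map (fun p => PySem.Chars.rfind inp.toList [p]))
      (fun x => x) = some (bScan inp.toList inp.toList.length) := by
    rw [List.map_cons, PySem.List.max?_id_cons]
    have h1 : -1 ≤ PySem.Chars.rfind inp.toList ['<'] := neg_one_le_go _ _ _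
    congr 1
    have h2 := idx_eq inp.toList
    rw [show pList = '<' :: ['>','^','~','.','?','!'] from rfl, List.map_cons, List.foldl_cons,
        max_eq_right h1] at h2
    exact h2
  simp only [hmax]
  by_cases h0 : (0:Int) ≤ bScan inp.toList inp.toList.length
  · rw [if_pos h0, if_pos h0]
    have hslice : PySem.Chars.slice inp.toList none (some (bScan inp.toList inp.toList.length + 1))
        = inp.toList.take ((bScan inp.toList inp.toList.length).toNat + 1) := by
      rw [PySem.Chars.slice_eq_listSlice, PySem.List.slice_to _ (by omega)]
      congr 1
      omega
    rw [hslice]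
    simp only [endswith_eq_isSuffixOf]
  · rw [if_neg h0, if_neg h0]
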